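-- pv_equiv track=rewrite | github.com/kr1shnaakhurana/zenlang | zenlang/src/runtime/zenweb.py | match_dynamic_route
-- ===== SOURCE A (Python) =====
-- def match_dynamic_route(path, route):
--     path_parts = path.strip('/').split('/')
--     route_parts = route.strip('/').split('/')
--
--     if len(path_parts) != len(route_parts):
--         return False
--
--     for pp, rp in zip(path_parts, route_parts):
--         if not rp.startswith(':') and pp != rp:
--             return False
--
--     return True
-- ===== SOURCE B (Python) =====
-- def match_dynamic_route(path, route):
--     # Two-pointer scan over the stripped strings; never builds segment lists.
--     def skip(s, i):  # advance i to the end of the current segment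
--         while i < len(s) and s[i] != '/':
--             i += 1
--         return i
--
--     p = path.strip('/')
--     r = route.strip('/')
--     i = j = 0
--     while True:
--         if j < len(r) and r[j] == ':':
--             i, j = skip(p, i), skip(r, j)
--         else:
--             while j < len(r) and r[j] != '/':
--                 if i >= len(p) or p[i] != r[j]:
--                     return False
--                 i += 1
--                 j += 1
--             if i < len(p) and p[i] != '/':
--                 return False
--         if i == len(p) and j == len(r):
--             return True
--         if i == len(p) or j == len(r):
--             return False
--         i += 1  # both p[i] and r[j] are '/'
--         j += 1
-- ===== Notes on version B (the rewrite author's own statement) =====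
-- stated objective: alternative
-- what changed: Replaces split-into-segment-lists plus zip comparison with a single two-pointer character scan over the stripped strings that never materializes any list.
import Mathlib
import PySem

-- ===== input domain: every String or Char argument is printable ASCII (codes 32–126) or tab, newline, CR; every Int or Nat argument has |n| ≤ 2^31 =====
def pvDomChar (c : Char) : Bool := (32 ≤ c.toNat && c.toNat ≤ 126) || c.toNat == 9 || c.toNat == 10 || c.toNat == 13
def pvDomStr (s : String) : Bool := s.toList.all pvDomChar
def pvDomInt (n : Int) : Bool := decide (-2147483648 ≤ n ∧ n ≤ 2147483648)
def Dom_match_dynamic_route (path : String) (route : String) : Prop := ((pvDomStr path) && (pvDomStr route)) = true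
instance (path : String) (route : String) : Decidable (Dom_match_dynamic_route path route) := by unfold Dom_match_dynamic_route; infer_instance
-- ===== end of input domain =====

-- B replaces A's split-into-segment-lists + zip loop by a single two-pointer character scan
-- over the stripped strings (an alternative of the same cost; no list is built).

-- ===== PORT A =====
-- the 'for pp, rp in zip(...)' loop of A, as structural recursion over the zipped list
def loopA : List (List Char × List Char) → Bool
  | [] => true
  | (pp, rp) :: rest =>
    if !(PySem.Chars.startswith rp [':']) && pp != rp then false else loopA rest

def match_dynamic_route (path : String) (route : String) : Bool :=
  let path_parts := PySem.Chars.splitOn (PySem.Chars.stripChars path.toList ['/']) ['/']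
  let route_parts := PySem.Chars.splitOn (PySem.Chars.stripChars route.toList ['/']) ['/']
  if path_parts.length ≠ route_parts.length then false
  else loopA (path_parts.zip route_parts)

-- ===== PORT B =====
-- skip(s, i): advance to the end of the current segment (here: drop the scanned prefix)
def skipSeg : List Char → List Char
  | [] => []
  | c :: cs => if c = '/' then c :: cs else skipSeg cs

-- the inner literal-segment while loop of B: compare p against the current route segment;
-- none = 'return False', some (p', r') = both scans arrived at a '/' or the end
def litSeg : List Char → List Char → Option (List Char × List Char)
  | p, [] => if p.head? = some '/' ∨ p = [] then some (p, []) else none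
  | p, c :: r' =>
    if c = '/' then (if p.head? = some '/' ∨ p = [] then some (p, c :: r') else none)
    else
      match p with
      | [] => none
      | d :: p' => if d = c then litSeg p' r' else none

theorem skipSeg_length_le (l : List Char) : (skipSeg l).length ≤ l.length := by
  induction l with
  | nil => simp [skipSeg]
  | cons c cs ih =>
    simp only [skipSeg]
    split
    · simp
    · simp only [List.length_cons]; omega

theorem litSeg_length_le : ∀ (p r p' r' : List Char),
    litSeg p r = some (p', r') → r'.length ≤ r.length := by
  intro p r
  induction r generalizing p with
  | nil =>
    intro p' r' h
    simp only [litSeg] at h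
    split at h
    · cases h; simp
    · cases h
  | cons c t ih =>
    intro p' r' h
    rw [litSeg.eq_def] at h; simp only [] at h
    split at h
    · split at h <;> simp_all
    · match p with
      | [] => simp at h
      | d :: p2 =>
        simp only at h
        split at h
        · have := ih p2 _ _ h; simp; omega
        · simp at h

theorem step_length (p r p' r' : List Char)
    (h : (if r.head? = some ':' then some (skipSeg p, skipSeg r) else litSeg p r) = some (p', r')) :
    r'.length ≤ r.length := by
  split at h
  · cases h; exact skipSeg_length_le r
  · exact litSeg_length_le p r p' r' h

-- the outer while-True loop of B: one segment step, then both pointers cross a '/'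
def goB (p r : List Char) : Bool :=
  match h : (if r.head? = some ':' then some (skipSeg p, skipSeg r) else litSeg p r) with
  | none => false
  | some (p', r') =>
    match p', r' with
    | [], [] => true
    | [], _ :: _ => false
    | _ :: _, [] => false
    | _ :: _, _ :: r2 =>
      goB (p'.tailD []) r2
termination_by r.length
decreasing_by
  have := step_length p r _ _ h
  simp only [List.length_cons] at this ⊢
  omega

def match_dynamic_route_alt (path : String) (route : String) : Bool :=
  goB (PySem.Chars.stripChars path.toList ['/']) (PySem.Chars.stripChars route.toList ['/'])

-- ===== PRECONDITION & SPEC =====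
def Spec_match_dynamic_route (path : String) (route : String) (out : Bool) : Prop := out = match_dynamic_route_alt path route
instance (path : String) (route : String) (out : Bool) : Decidable (Spec_match_dynamic_route path route out) := by unfold Spec_match_dynamic_route; infer_instance

-- ===== CLAIM (what is proved, stated in full; the proofs are below) =====
def Claim_equal_match_dynamic_route : Prop := ∀ (path : String) (route : String), Dom_match_dynamic_route path route → Spec_match_dynamic_route path route (match_dynamic_route path route)

-- ===== LEMMAS AND PROOFS =====

theorem skipSeg_eq_dropWhile (l : List Char) : skipSeg l = l.dropWhile (· ≠ '/') := by
  induction l with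
  | nil => simp [skipSeg]
  | cons c cs ih =>
    simp only [skipSeg, List.dropWhile_cons]
    by_cases h : c = '/' <;> simp [h, ih]

-- one unfolding step of PySem.Chars.splitOn.go for sep = "/"
theorem go_nil (cur : List Char) (acc : List (List Char)) (fuel : Nat) :
    PySem.Chars.splitOn.go ['/'] fuel [] cur acc = (cur.reverse :: acc).reverse := by
  match fuel with
  | 0 => rw [PySem.Chars.splitOn.go]; simp
  | f+1 => rw [PySem.Chars.splitOn.go]; simp

theorem go_cons (fuel : Nat) (c : Char) (rest cur : List Char) (acc : List (List Char)) :
    PySem.Chars.splitOn.go ['/'] (fuel+1) (c :: rest) cur acc =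
      (if c = '/' then PySem.Chars.splitOn.go ['/'] fuel rest [] (cur.reverse :: acc)
       else PySem.Chars.splitOn.go ['/'] fuel rest (c :: cur) acc) := by
  have hp : (['/'].isPrefixOf (c :: rest)) = ('/' == c) := by simp [List.isPrefixOf]
  rw [PySem.Chars.splitOn.go, hp]
  by_cases h : c = '/'
  · rw [if_pos h, if_pos (by simp [h])]
    simp [h]
  · rw [if_neg h, if_neg (by simp [Ne.symm h])]

theorem go_irrel : ∀ (f1 f2 : Nat) (l cur : List Char) (acc : List (List Char)),
    l.length ≤ f1 → l.length ≤ f2 →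
    PySem.Chars.splitOn.go ['/'] f1 l cur acc = PySem.Chars.splitOn.go ['/'] f2 l cur acc := by
  intro f1
  induction f1 with
  | zero =>
    intro f2 l cur acc h1 _
    have : l = [] := by cases l <;> simp_all
    subst this
    rw [go_nil, go_nil]
  | succ f1 ih =>
    intro f2 l cur acc h1 h2
    match l, f2 with
    | [], f2 => rw [go_nil, go_nil]
    | c :: rest, f2+1 =>
      rw [go_cons, go_cons]
      simp only [List.length_cons] at h1 h2
      by_cases h : c = '/'
      · rw [if_pos h, if_pos h]
        exact ih f2 rest [] (cur.reverse :: acc) (by omega) (by omega)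
      · rw [if_neg h, if_neg h]
        exact ih f2 rest (c :: cur) acc (by omega) (by omega)

-- the segments after the first one
def tailSegs (l : List Char) : List (List Char) :=
  match l.dropWhile (· ≠ '/') with
  | [] => []
  | _ :: rest => PySem.Chars.splitOn rest ['/']

theorem go_split : ∀ (fuel : Nat) (l cur : List Char) (acc : List (List Char)),
    l.length ≤ fuel →
    PySem.Chars.splitOn.go ['/'] fuel l cur acc =
      acc.reverse ++ ((cur.reverse ++ l.takeWhile (· ≠ '/')) :: tailSegs l) := by
  intro fuel
  induction fuel with
  | zero =>
    intro l cur acc h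
    have : l = [] := by cases l <;> simp_all
    subst this
    rw [go_nil]; simp [tailSegs]
  | succ fuel ih =>
    intro l cur acc h
    match l with
    | [] => rw [go_nil]; simp [tailSegs]
    | c :: rest =>
      rw [go_cons]
      simp only [List.length_cons] at h
      by_cases hc : c = '/'
      · rw [if_pos hc, ih rest [] (cur.reverse :: acc) (by omega)]
        have hsplit : PySem.Chars.splitOn rest ['/'] =
            rest.takeWhile (· ≠ '/') :: tailSegs rest := by
          show PySem.Chars.splitOn.go ['/'] (rest.length + 1) rest [] [] = _
          rw [go_irrel (rest.length + 1) fuel rest [] [] (by omega) (by omega),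
              ih rest [] [] (by omega)]
          simp
        have ht : (c :: rest).takeWhile (· ≠ '/') = [] := by simp [hc]
        have hd : tailSegs (c :: rest) = PySem.Chars.splitOn rest ['/'] := by
          simp [tailSegs, hc]
        rw [ht, hd, hsplit]
        simp
      · rw [if_neg hc, ih rest (c :: cur) acc (by omega)]
        have ht : (c :: rest).takeWhile (· ≠ '/') = c :: rest.takeWhile (· ≠ '/') := by
          simp [hc]
        have hd : tailSegs (c :: rest) = tailSegs rest := by
          simp [tailSegs, List.dropWhile_cons, hc]
        rw [ht, hd]
        simp

theorem splitOn_slash (s : List Char) :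
    PySem.Chars.splitOn s ['/'] = s.takeWhile (· ≠ '/') :: tailSegs s := by
  show PySem.Chars.splitOn.go ['/'] (s.length + 1) s [] [] = _
  rw [go_split (s.length + 1) s [] [] (by omega)]
  simp

theorem litSeg_eq : ∀ (p r : List Char),
    litSeg p r =
      (if p.takeWhile (· ≠ '/') = r.takeWhile (· ≠ '/')
       then some (skipSeg p, skipSeg r) else none) := by
  intro p r
  induction r generalizing p with
  | nil =>
    simp only [litSeg, List.takeWhile_nil]
    match p with
    | [] => simp [skipSeg]
    | d :: p' =>
      by_cases hd : d = '/'
      · rw [if_pos (by simp [hd]), if_pos (by simp [hd])]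
        simp [skipSeg, hd]
      · rw [if_neg (by simp [hd]), if_neg (by simp [hd])]
  | cons c r' ih =>
    rw [litSeg.eq_def]
    simp only
    by_cases hc : c = '/'
    · rw [if_pos hc]
      have hr : (c :: r').takeWhile (· ≠ '/') = [] := by simp [hc]
      have hs : skipSeg (c :: r') = c :: r' := by simp [skipSeg, hc]
      rw [hr, hs]
      match p with
      | [] => simp [skipSeg]
      | d :: p' =>
        by_cases hd : d = '/'
        · rw [if_pos (by simp [hd]), if_pos (by simp [hd])]
          simp [skipSeg, hd]
        · rw [if_neg (by simp [hd]), if_neg (by simp [hd])]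
    · rw [if_neg hc]
      have hr : (c :: r').takeWhile (· ≠ '/') = c :: r'.takeWhile (· ≠ '/') := by simp [hc]
      rw [hr]
      match p with
      | [] => simp
      | d :: p' =>
        simp only
        by_cases hd : d = c
        · subst hd
          have hp : (d :: p').takeWhile (· ≠ '/') = d :: p'.takeWhile (· ≠ '/') := by simp [hc]
          have hsp : skipSeg (d :: p') = skipSeg p' := by simp [skipSeg, hc]
          have hsr : skipSeg (d :: r') = skipSeg r' := by simp [skipSeg, hc]
          rw [if_pos rfl, ih p', hp, hsp, hsr]
          simp
        · rw [if_neg hd]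
          by_cases hdd : d = '/'
          · have hp : (d :: p').takeWhile (· ≠ '/') = [] := by simp [hdd]
            rw [hp, if_neg (by simp)]
          · have hp : (d :: p').takeWhile (· ≠ '/') = d :: p'.takeWhile (· ≠ '/') := by
              simp [hdd]
            rw [hp, if_neg (by simp [hd])]

theorem startswith_takeWhile_colon_false (r : List Char) (hc : r.head? ≠ some ':') :
    PySem.Chars.startswith (r.takeWhile (· ≠ '/')) [':'] = false := by
  match r with
  | [] => simp [PySem.Chars.startswith, List.isPrefixOf]
  | c :: t =>
    simp only [List.head?_cons, ne_eq, Option.some.injEq] at hc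
    by_cases hd : c = '/'
    · simp [hd, PySem.Chars.startswith, List.isPrefixOf]
    · have : (c :: t).takeWhile (· ≠ '/') = c :: t.takeWhile (· ≠ '/') := by simp [hd]
      rw [this]
      simp [PySem.Chars.startswith, List.isPrefixOf, Ne.symm hc]

-- the right-hand side of the main invariant: A's length check + zip loop on the segment lists
def rhsB (p r : List Char) : Bool :=
  ((PySem.Chars.splitOn p ['/']).length == (PySem.Chars.splitOn r ['/']).length)
    && loopA ((PySem.Chars.splitOn p ['/']).zip (PySem.Chars.splitOn r ['/']))

theorem tail_cases (n : Nat)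
    (IH : ∀ m, m < n → ∀ p r : List Char, r.length ≤ m → goB p r = rhsB p r)
    (p r : List Char) (hr : r.length ≤ n)
    (hstep : (if r.head? = some ':' then some (skipSeg p, skipSeg r) else litSeg p r)
        = some (p.dropWhile (· ≠ '/'), r.dropWhile (· ≠ '/')))
    (hhead : (!(PySem.Chars.startswith (r.takeWhile (· ≠ '/')) [':'])
        && (p.takeWhile (· ≠ '/') != r.takeWhile (· ≠ '/'))) = false) :
    goB p r = rhsB p r := by
  have hrhs : rhsB p r =
      (((tailSegs p).length == (tailSegs r).length)
        && loopA ((tailSegs p).zip (tailSegs r))) := by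
    unfold rhsB
    rw [splitOn_slash p, splitOn_slash r]
    have hloop : loopA (((p.takeWhile (· ≠ '/')) :: tailSegs p).zip
        ((r.takeWhile (· ≠ '/')) :: tailSegs r)) = loopA ((tailSegs p).zip (tailSegs r)) := by
      rw [List.zip_cons_cons]
      simp only [loopA]
      rw [hhead]
      simp
    rw [hloop]
    simp only [List.length_cons]
    by_cases hl : (tailSegs p).length = (tailSegs r).length
    · simp [hl]
    · have h1 : ((tailSegs p).length + 1 == (tailSegs r).length + 1) = false := by
        simp
        omega
      have h2 : ((tailSegs p).length == (tailSegs r).length) = false := by simp [hl]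
      rw [h1, h2]
  rw [goB.eq_def]
  split
  · rename_i heq
    rw [hstep] at heq
    cases heq
  · rename_i p' r' heq
    rw [hstep] at heq
    injection heq with heq
    injection heq with hp' hr'
    match p', r', hp', hr' with
    | [], [], hp', hr' =>
      show true = rhsB p r
      have htp : tailSegs p = [] := by unfold tailSegs; rw [hp']
      have htr : tailSegs r = [] := by unfold tailSegs; rw [hr']
      rw [hrhs, htp, htr]
      rfl
    | [], b :: r2, hp', hr' =>
      show false = rhsB p r
      have htp : tailSegs p = [] := by unfold tailSegs; rw [hp']
      have htr : tailSegs r = PySem.Chars.splitOn r2 ['/'] := by unfold tailSegs; rw [hr']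
      rw [hrhs, htp, htr, splitOn_slash r2]
      simp
    | a :: p2, [], hp', hr' =>
      show false = rhsB p r
      have htp : tailSegs p = PySem.Chars.splitOn p2 ['/'] := by unfold tailSegs; rw [hp']
      have htr : tailSegs r = [] := by unfold tailSegs; rw [hr']
      rw [hrhs, htp, htr, splitOn_slash p2]
      simp
    | a :: p2, b :: r2, hp', hr' =>
      show goB p2 r2 = rhsB p r
      have hr2 : r2.length < n := by
        have h1 : (r.dropWhile (· ≠ '/')).length ≤ r.length := r.length_dropWhile_le _
        rw [hr'] at h1
        simp only [List.length_cons] at h1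
        omega
      have htp : tailSegs p = PySem.Chars.splitOn p2 ['/'] := by unfold tailSegs; rw [hp']
      have htr : tailSegs r = PySem.Chars.splitOn r2 ['/'] := by unfold tailSegs; rw [hr']
      rw [IH r2.length hr2 p2 r2 le_rfl, hrhs, htp, htr]
      rfl

theorem goB_eq_rhsB : ∀ (n : Nat) (p r : List Char), r.length ≤ n → goB p r = rhsB p r := by
  intro n
  induction n using Nat.strong_induction_on with
  | _ n IH =>
    intro p r hr
    by_cases hc : r.head? = some ':'
    · -- wildcard segment
      have hcol : PySem.Chars.startswith (r.takeWhile (· ≠ '/')) [':'] = true := by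
        match r, hc with
        | c :: t, hc =>
          simp only [List.head?_cons, Option.some.injEq] at hc
          have : (c :: t).takeWhile (· ≠ '/') = c :: t.takeWhile (· ≠ '/') := by
            rw [hc]; simp
          rw [this, hc]
          simp [PySem.Chars.startswith, List.isPrefixOf]
      exact tail_cases n IH p r hr
        (by rw [if_pos hc, skipSeg_eq_dropWhile, skipSeg_eq_dropWhile])
        (by rw [hcol]; simp)
    · by_cases hseg : p.takeWhile (· ≠ '/') = r.takeWhile (· ≠ '/')
      · -- matching literal segment
        exact tail_cases n IH p r hr
          (by rw [if_neg hc, litSeg_eq, if_pos hseg, skipSeg_eq_dropWhile,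
                  skipSeg_eq_dropWhile])
          (by rw [hseg]; simp)
      · -- mismatching literal segment: both sides are false
        have hstep : (if r.head? = some ':' then some (skipSeg p, skipSeg r) else litSeg p r)
            = none := by
          rw [if_neg hc, litSeg_eq, if_neg hseg]
        have hA : goB p r = false := by
          rw [goB.eq_def]
          split
          · rfl
          · rename_i heq
            rw [hstep] at heq
            cases heq
        rw [hA]
        unfold rhsB
        rw [splitOn_slash p, splitOn_slash r, List.zip_cons_cons]
        have hsw := startswith_takeWhile_colon_false r hc
        have hcond : (!(PySem.Chars.startswith (r.takeWhile (· ≠ '/')) [':'])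
            && (p.takeWhile (· ≠ '/') != r.takeWhile (· ≠ '/'))) = true := by
          rw [hsw]
          simp only [Bool.not_false, Bool.true_and, bne_iff_ne, ne_eq]
          exact hseg
        simp only [loopA]
        rw [hcond]
        simp

-- ===== VERDICT (by name: the statement is the Claim_ definition above) =====
theorem match_dynamic_route_spec : Claim_equal_match_dynamic_route := by
  intro path route _
  unfold Spec_match_dynamic_route match_dynamic_route match_dynamic_route_alt
  rw [goB_eq_rhsB (PySem.Chars.stripChars route.toList ['/']).length _ _ le_rfl]
  unfold rhsB
  by_cases h : (PySem.Chars.splitOn (PySem.Chars.stripChars path.toList ['/']) ['/']).length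
      = (PySem.Chars.splitOn (PySem.Chars.stripChars route.toList ['/']) ['/']).length
  · simp [h]
  · simp [h]
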